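-- pv_equiv track=rewrite | github.com/babcs2035/lecture-3S-W3 | week04/task-Ex.py | check
-- ===== SOURCE A (Python) =====
-- def check(N, K, A, x):
--     l = 0
--     r = 0
--     s = A[0]
--     c = 0
--     while r < N:
--         if s < x:
--             r += 1
--             if r < N:
--                 s += A[r]
--         else:
--             c += N - r
--             s -= A[l]
--             l += 1
--     return c >= K
-- ===== SOURCE B (Python) =====
-- def check(N, K, A, x):
--     c = 0
--     for l in range(N):
--         s = 0
--         for r in range(l, N):
--             s += A[r]
--             if s >= x:
--                 c += 1
--     return c >= K
-- ===== Notes on version B (the rewrite author's own statement) =====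
-- stated objective: simpler
-- what changed: Replaces the stateful sliding-window (two moving pointers l/r with an incrementally maintained window sum and block counting c += N-r) by a plain nested loop that counts each qualifying (l,r) subarray directly; agreement rests on the non-negativity of the elements, which makes the window sums monotone.
-- outside the precondition, e.g. on check(3, 4, [-1, 5, -1], 4): A returns True, B returns False; on check(2, 1, [5, -5], 6): A returns False, B returns False; on check(2, 1, [0, 3], 0): A raises IndexError, B returns True
import Mathlib
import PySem

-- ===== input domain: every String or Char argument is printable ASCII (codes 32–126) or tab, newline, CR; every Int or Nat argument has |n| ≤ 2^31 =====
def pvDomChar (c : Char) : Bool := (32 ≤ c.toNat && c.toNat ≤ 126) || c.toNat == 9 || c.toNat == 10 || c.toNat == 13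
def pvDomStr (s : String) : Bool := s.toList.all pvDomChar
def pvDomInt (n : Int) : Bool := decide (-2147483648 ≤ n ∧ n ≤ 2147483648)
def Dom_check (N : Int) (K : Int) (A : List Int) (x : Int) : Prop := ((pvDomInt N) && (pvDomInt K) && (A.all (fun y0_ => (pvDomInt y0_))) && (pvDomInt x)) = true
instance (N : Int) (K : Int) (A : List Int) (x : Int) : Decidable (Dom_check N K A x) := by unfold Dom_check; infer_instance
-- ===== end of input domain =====

-- B replaces A's sliding window by a direct nested-loop count of the qualifying subarrays
-- (simpler, not faster); the return value is proved equal on Pre_check.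

-- ===== PORT A =====
-- A's while loop: state (l, r, s, c); each iteration moves r (window grows) or l (window
-- shrinks, block-counting c += N - r).  Fuel 2*N.toNat+2 bounds the iteration count on every
-- input Pre_check admits (each step increases l or r, l ≤ r+1 ≤ N); it only makes the
-- transcription total.  A[i] is ported as PySem.List.pyGetD (in range on Pre_check inputs).
def checkLoop (N x : Int) (A : List Int) : Nat → Int → Int → Int → Int → Int
  | 0, _, _, _, c => c
  | fuel+1, l, r, s, c =>
    if r < N then
      if s < x then
        checkLoop N x A fuel l (r+1) (if r+1 < N then s + PySem.List.pyGetD A (r+1) 0 else s) c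
      else
        checkLoop N x A fuel (l+1) r (s - PySem.List.pyGetD A l 0) (c + (N - r))
    else c

def check (N : Int) (K : Int) (A : List Int) (x : Int) : Bool :=
  decide (K ≤ checkLoop N x A (2 * N.toNat + 2) 0 0 (PySem.List.pyGetD A 0 0) 0)

-- ===== PORT B =====
-- B (Source B): for l in range(N): s = 0; for r in range(l, N): s += A[r]; if s >= x: c += 1
-- stepB is one pass of the inner loop body: s += A[r]; if s >= x: c += 1
def stepB (A : List Int) (x : Int) (p : Int × Int) (r : Int) : Int × Int :=
  (p.1 + PySem.List.pyGetD A r 0, if x ≤ p.1 + PySem.List.pyGetD A r 0 then p.2 + 1 else p.2)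

def check_alt (N : Int) (K : Int) (A : List Int) (x : Int) : Bool :=
  decide (K ≤ (PySem.List.pyRange 0 N 1).foldl (fun c l =>
    ((PySem.List.pyRange l N 1).foldl (stepB A x) ((0 : Int), c)).2) 0)

-- ===== PRECONDITION & SPEC =====
-- Pre_check is the natural domain of A's sliding window: a non-empty list and, when the loop
-- runs (N ≥ 1), N ≤ len(A), a positive threshold and non-negative scanned elements.  Outside
-- it A raises IndexError (empty A; N > len(A); x ≤ 0 exhausts l past the list) or — with
-- negative scanned elements, where the window sums are not monotone — returns a count that
-- depends on the window schedule rather than on the subarrays, which B does not reproduce.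
def Pre_check (N : Int) (K : Int) (A : List Int) (x : Int) : Prop :=
  A ≠ [] ∧ (N ≤ 0 ∨ (N ≤ (A.length : Int) ∧ 1 ≤ x ∧ ∀ a ∈ A.take N.toNat, 0 ≤ a))
instance (N : Int) (K : Int) (A : List Int) (x : Int) : Decidable (Pre_check N K A x) := by unfold Pre_check; infer_instance

def pvWitness_check : Int × Int × List Int × Int := (3, 2, [1, 2, 3], 3)

def Spec_check (N : Int) (K : Int) (A : List Int) (x : Int) (out : Bool) : Prop := out = check_alt N K A x
instance (N : Int) (K : Int) (A : List Int) (x : Int) (out : Bool) : Decidable (Spec_check N K A x out) := by unfold Spec_check; infer_instance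

-- ===== CLAIM (what is proved, stated in full; the proofs are below) =====
def Claim_equal_check : Prop := ∀ (N : Int) (K : Int) (A : List Int) (x : Int), Dom_check N K A x → Pre_check N K A x → Spec_check N K A x (check N K A x)

-- ===== LEMMAS AND PROOFS =====

-- sum of the first k elements of A
def pref (A : List Int) (k : ℕ) : Int := (A.take k).sum

-- number of r ∈ [l, n) with A[l] + … + A[r] ≥ x
def subCnt (A : List Int) (x : Int) (n l : ℕ) : ℕ :=
  ((Finset.Ico l n).filter (fun r => x ≤ pref A (r+1) - pref A l)).card

lemma pref_succ (A : List Int) (k : ℕ) (hk : k < A.length) :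
    pref A (k+1) = pref A k + A.getD k 0 := by
  simp only [pref, List.take_succ, List.sum_append, List.getElem?_eq_getElem hk,
    Option.toList_some, List.sum_cons, List.sum_nil,
    List.getD_eq_getElem?_getD, Option.getD_some, add_zero]

lemma pref_mono (A : List Int) (n : ℕ) (hlen : n ≤ A.length)
    (hnn : ∀ a ∈ A.take n, 0 ≤ a) :
    ∀ k m, k ≤ m → m ≤ n → pref A k ≤ pref A m := by
  intro k m hkm hmn
  induction m with
  | zero => interval_cases k; exact le_refl _
  | succ m ih =>
    rcases Nat.lt_or_ge k (m+1) with h | h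
    · have hm : m < A.length := by omega
      have h0 : 0 ≤ A.getD m 0 := by
        have hmem : A[m] ∈ A.take n := by
          have he : (A.take n)[m]'(by simp; omega) = A[m] := by
            simp [List.getElem_take]
          exact he ▸ List.getElem_mem _
        have := hnn _ hmem
        simpa [List.getD_eq_getElem?_getD, List.getElem?_eq_getElem hm] using this
      have hih := ih (by omega) (by omega)
      rw [pref_succ A m hm]
      omega
    · have hk1 : k = m + 1 := by omega
      subst hk1; exact le_refl _

lemma loopA (A : List Int) (x : Int) (n : ℕ) (hlen : n ≤ A.length) (hx : 1 ≤ x)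
    (hnn : ∀ a ∈ A.take n, 0 ≤ a) :
    ∀ fuel (l r : ℕ) (s c : Int),
      l ≤ r + 1 → r ≤ n →
      (r < n → s = pref A (r+1) - pref A l) →
      (∀ r', l ≤ r' → r' < r → pref A (r'+1) - pref A l < x) →
      (n - r) + (n + 1 - l) ≤ fuel →
      checkLoop (n : Int) x A fuel (l : Int) (r : Int) s c
        = c + ∑ l' ∈ Finset.Ico l n, ((subCnt A x n l' : ℕ) : Int) := by
  intro fuel
  induction fuel with
  | zero =>
    intro l r s c h1 h2 _ _ hfuel
    have hr : r = n := by omega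
    have hl : l = n + 1 := by omega
    subst hr; subst hl
    rw [Finset.Ico_eq_empty (by omega)]
    simp [checkLoop]
  | succ fuel ih =>
    intro l r s c h1 h2 hs hii hfuel
    rcases Nat.lt_or_ge r n with hrn | hrn
    · have hrn' : (r : Int) < (n : Int) := by exact_mod_cast hrn
      have hsval := hs hrn
      by_cases hsx : s < x
      · -- s < x : grow the window
        simp only [checkLoop, if_pos hrn', if_pos hsx]
        have key : ((r : Int) + 1) = ((r + 1 : ℕ) : Int) := by push_cast; ring
        rw [key]
        have hs' : r + 1 < n →
            (if ((r + 1 : ℕ) : Int) < (n : Int) then s + PySem.List.pyGetD A ((r + 1 : ℕ) : Int) 0 else s)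
              = pref A (r + 2) - pref A l := by
          intro h
          rw [if_pos (by exact_mod_cast h), PySem.List.pyGetD_natCast,
            pref_succ A (r+1) (by omega), hsval]
          ring
        have hii' : ∀ r', l ≤ r' → r' < r + 1 → pref A (r'+1) - pref A l < x := by
          intro r' hlr' hr'
          rcases Nat.lt_or_ge r' r with h | h
          · exact hii r' hlr' h
          · have : r' = r := by omega
            subst this
            rw [← hsval]; exact hsx
        exact ih l (r+1) _ c (by omega) (by omega) hs' hii' (by omega)
      · -- x ≤ s : count and shrink
        push_neg at hsx
        have hlr : l ≤ r := by
          by_contra hcon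
          have hlr1 : l = r + 1 := by omega
          rw [hlr1, sub_self] at hsval
          omega
        have hll : l < n := by omega
        simp only [checkLoop, if_pos hrn', if_neg (not_lt.mpr hsx)]
        have hgetl : PySem.List.pyGetD A (l : Int) 0 = A.getD l 0 :=
          PySem.List.pyGetD_natCast A l 0
        rw [hgetl]
        have hs2 : r < n → s - A.getD l 0 = pref A (r+1) - pref A (l+1) := by
          intro _
          rw [hsval, pref_succ A l (by omega)]
          ring
        have hmonol := pref_mono A n hlen hnn l (l+1) (by omega) (by omega)
        have hii2 : ∀ r', l + 1 ≤ r' → r' < r → pref A (r'+1) - pref A (l+1) < x := by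
          intro r' hr1 hr2
          have h0 := hii r' (by omega) hr2
          omega
        have keyl : ((l : Int) + 1) = ((l + 1 : ℕ) : Int) := by push_cast; ring
        rw [keyl]
        rw [ih (l+1) r (s - A.getD l 0) (c + ((n : Int) - (r : Int))) (by omega) (by omega) hs2 hii2 (by omega)]
        have hcnt : subCnt A x n l = n - r := by
          unfold subCnt
          have hset : (Finset.Ico l n).filter (fun r'' => x ≤ pref A (r''+1) - pref A l)
              = Finset.Ico r n := by
            ext r''
            simp only [Finset.mem_filter, Finset.mem_Ico]
            constructor
            · rintro ⟨⟨ha, hb⟩, hc⟩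
              refine ⟨?_, hb⟩
              by_contra hcon
              push_neg at hcon
              exact absurd hc (not_le.mpr (hii r'' ha hcon))
            · rintro ⟨ha, hb⟩
              refine ⟨⟨by omega, hb⟩, ?_⟩
              have hm := pref_mono A n hlen hnn (r+1) (r''+1) (by omega) (by omega)
              omega
          rw [hset, Nat.card_Ico]
        rw [Finset.sum_eq_sum_Ico_succ_bot hll, hcnt]
        have hc2 : ((n - r : ℕ) : Int) = (n : Int) - (r : Int) := by omega
        rw [hc2]
        ring
    · -- r = n : the loop exits; every remaining start contributes 0
      have hnotlt : ¬ ((r : Int) < (n : Int)) := by exact_mod_cast not_lt.mpr hrn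
      simp only [checkLoop, if_neg hnotlt]
      have hzero : ∀ l' ∈ Finset.Ico l n, ((subCnt A x n l' : ℕ) : Int) = 0 := by
        intro l' hl'
        simp only [Finset.mem_Ico] at hl'
        unfold subCnt
        have hset : (Finset.Ico l' n).filter (fun r'' => x ≤ pref A (r''+1) - pref A l') = ∅ := by
          apply Finset.filter_eq_empty_iff.mpr
          intro r'' hr''
          simp only [Finset.mem_Ico] at hr''
          have h0 := hii r'' (by omega) (by omega)
          have hm := pref_mono A n hlen hnn l l' (by omega) (by omega)
          omega
        rw [hset]
        simp
      rw [Finset.sum_congr rfl hzero]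
      simp

lemma innerB (A : List Int) (x : Int) (n : ℕ) (hlen : n ≤ A.length) (l : ℕ) :
    ∀ d (r : ℕ), n - r = d → l ≤ r → r ≤ n → ∀ c : Int,
      ((PySem.List.pyRange (r : Int) (n : Int) 1).foldl (stepB A x)
          (pref A r - pref A l, c)).2
        = c + (((Finset.Ico r n).filter (fun r' => x ≤ pref A (r'+1) - pref A l)).card : Int) := by
  intro d
  induction d with
  | zero =>
    intro r hd hlr hrn c
    have hr : r = n := by omega
    subst hr
    rw [PySem.List.pyRange_one_eq_nil (le_refl _)]
    simp
  | succ d ihd =>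
    intro r hd hlr hrn c
    have hrn' : r < n := by omega
    rw [PySem.List.pyRange_one_cons (by exact_mod_cast hrn')]
    simp only [List.foldl_cons, stepB, PySem.List.pyGetD_natCast]
    have hnew : pref A r - pref A l + A.getD r 0 = pref A (r+1) - pref A l := by
      rw [pref_succ A r (by omega)]
      ring
    rw [hnew]
    have key : ((r : Int) + 1) = ((r + 1 : ℕ) : Int) := by push_cast; ring
    rw [key, ihd (r+1) (by omega) (by omega) (by omega) _]
    have hsplit : (((Finset.Ico r n).filter (fun r' => x ≤ pref A (r'+1) - pref A l)).card : Int)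
        = (if x ≤ pref A (r+1) - pref A l then 1 else 0)
          + (((Finset.Ico (r+1) n).filter (fun r' => x ≤ pref A (r'+1) - pref A l)).card : Int) := by
      rw [Finset.card_filter, Finset.card_filter, Finset.sum_eq_sum_Ico_succ_bot hrn']
      push_cast
      ring
    rw [hsplit]
    split_ifs <;> ring

lemma outerB (A : List Int) (x : Int) (n : ℕ) (hlen : n ≤ A.length) :
    ∀ d (l : ℕ), n - l = d → l ≤ n → ∀ c : Int,
      (PySem.List.pyRange (l : Int) (n : Int) 1).foldl (fun c l' =>
        ((PySem.List.pyRange l' (n : Int) 1).foldl (stepB A x) ((0 : Int), c)).2) c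
        = c + ∑ l' ∈ Finset.Ico l n, ((subCnt A x n l' : ℕ) : Int) := by
  intro d
  induction d with
  | zero =>
    intro l hd hln c
    have hl : l = n := by omega
    subst hl
    rw [PySem.List.pyRange_one_eq_nil (le_refl _), Finset.Ico_self]
    simp
  | succ d ihd =>
    intro l hd hln c
    have hln' : l < n := by omega
    rw [PySem.List.pyRange_one_cons (by exact_mod_cast hln')]
    simp only [List.foldl_cons]
    have hinit : ((0 : Int), c) = (pref A l - pref A l, c) := by rw [sub_self]
    rw [hinit, innerB A x n hlen l (n - l) l rfl (le_refl _) (by omega) c]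
    have key : ((l : Int) + 1) = ((l + 1 : ℕ) : Int) := by push_cast; ring
    rw [key, ihd (l+1) (by omega) (by omega) _]
    rw [Finset.sum_eq_sum_Ico_succ_bot hln']
    unfold subCnt
    ring

lemma pref_zero (A : List Int) : pref A 0 = 0 := by simp [pref]

-- ===== VERDICT (by name: the statement is the Claim_ definition above) =====
theorem check_spec : Claim_equal_check := by
  intro N K A x _ hpre
  obtain ⟨hA, hcase⟩ := hpre
  unfold Spec_check check check_alt
  by_cases hN0 : N ≤ 0
  · -- N ≤ 0 : A's loop never runs, B's outer range is empty; both counts are 0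
    have h1 : ¬ ((0 : Int) < N) := by omega
    have h2 : PySem.List.pyRange 0 N 1 = [] := PySem.List.pyRange_one_eq_nil (by omega)
    have hfuel : 2 * N.toNat + 2 = (2 * N.toNat + 1) + 1 := rfl
    rw [hfuel, h2]
    simp [checkLoop, h1]
  · -- 1 ≤ N : both sides compute the number of qualifying (l, r) pairs
    rcases hcase with hle | ⟨hNlen, hx, hnn⟩
    · exact absurd hle hN0
    push_neg at hN0
    have hNn : ((N.toNat : ℕ) : Int) = N := Int.toNat_of_nonneg (by omega)
    have hlen : N.toNat ≤ A.length := by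
      have h : (N.toNat : Int) ≤ (A.length : Int) := by rw [hNn]; exact hNlen
      exact_mod_cast h
    have hn1 : 1 ≤ N.toNat := by omega
    have hA0 : 0 < A.length := by omega
    have hs0 : (0 : ℕ) < N.toNat → PySem.List.pyGetD A 0 0 = pref A (0+1) - pref A 0 := by
      intro _
      rw [PySem.List.pyGetD_zero, pref_succ A 0 hA0, pref_zero]
      simp [List.getD_eq_getElem?_getD]
    have hAside := loopA A x N.toNat hlen hx hnn (2 * N.toNat + 2) 0 0
      (PySem.List.pyGetD A 0 0) 0 (by omega) (by omega) hs0
      (by intro r' h h'; omega) (by omega)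
    have hBside := outerB A x N.toNat hlen N.toNat 0 (by omega) (by omega) 0
    simp only [Nat.cast_zero, hNn] at hAside hBside
    rw [hAside, hBside]
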